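-- pv_equiv track=rewrite | github.com/ggaitsgori/GMU | ne_solvers.py | enumerate_k_configurations
-- ===== SOURCE A (Python) =====
-- from typing import Any, Callable, Dict, List, Optional, Tuple
--
-- def enumerate_k_configurations(m: int, n: int) -> List[List[int]]:
--     """
--     Enumerate all admissible cutoff vectors k = (k_1,...,k_m) with
--     1 <= k_m <= ... <= k_1 <= n.
--     """
--     configs: List[List[int]] = []
--     cur = [1] * m
--
--     def backtrack(pos: int, last_val: int) -> None:
--         if pos == m:
--             configs.append(cur[::-1])
--             return
--         for v in range(last_val, n + 1):
--             cur[pos] = v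
--             backtrack(pos + 1, v)
--
--     backtrack(0, 1)
--     return configs
-- ===== SOURCE B (Python) =====
-- def enumerate_k_configurations(m, n):
--     rows = [[]]
--     for _ in range(m):
--         rows = [row + [v]
--                 for row in rows
--                 for v in range(row[-1] if row else 1, n + 1)]
--     return [row[::-1] for row in rows]
-- ===== Notes on version B (the rewrite author's own statement) =====
-- stated objective: simpler
-- what changed: Replaced the mutating recursive backtracking over a shared cur buffer with an iterative level-by-level comprehension that extends every partial row by one position per round.
-- outside the precondition, e.g. on enumerate_k_configurations(-1, 0): A returns [], B returns [[]]; on enumerate_k_configurations(-1, 2): A raises IndexError, B returns [[]]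
import Mathlib
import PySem

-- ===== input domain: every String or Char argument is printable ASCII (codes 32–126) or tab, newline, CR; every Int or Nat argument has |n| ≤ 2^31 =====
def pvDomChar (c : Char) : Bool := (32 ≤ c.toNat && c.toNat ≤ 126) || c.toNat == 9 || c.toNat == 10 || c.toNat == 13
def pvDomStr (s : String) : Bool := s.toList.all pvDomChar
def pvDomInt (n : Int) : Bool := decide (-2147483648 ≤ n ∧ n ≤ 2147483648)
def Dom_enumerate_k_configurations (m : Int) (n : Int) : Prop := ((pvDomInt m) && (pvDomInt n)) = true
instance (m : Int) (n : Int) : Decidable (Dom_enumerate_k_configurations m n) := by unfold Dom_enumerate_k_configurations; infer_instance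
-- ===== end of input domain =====

-- B replaces A's mutating recursive backtracking with an iterative level-by-level
-- comprehension (simpler decomposition, same cost); equivalence proved for m >= 0.


-- ===== PORT A =====
-- backtrack(pos, last_val), threading the mutable `cur` and `configs` through the state;
-- `fuel` is the termination measure m - pos (never exhausted on the admitted inputs).
def pvBacktrack (m n : Int) : Nat → Nat → Int → List Int → List (List Int) → List Int × List (List Int)
  | fuel, pos, last_val, cur, configs =>
    if (pos : Int) = m then (cur, configs ++ [cur.reverse])
    else
      match fuel with
      | 0 => (cur, configs)
      | f + 1 =>
        (PySem.List.pyRange last_val (n + 1) 1).foldl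
          (fun st v => pvBacktrack m n f (pos + 1) v (st.1.set pos v) st.2)
          (cur, configs)

def enumerate_k_configurations (m : Int) (n : Int) : List (List Int) :=
  (pvBacktrack m n m.toNat 0 1 (List.replicate m.toNat 1) []).2

-- ===== PORT B =====
def enumerate_k_configurations_alt (m : Int) (n : Int) : List (List Int) :=
  let rows : List (List Int) :=
    (PySem.List.pyRange 0 m 1).foldl
      (fun rows _ =>
        rows.flatMap (fun row =>
          (PySem.List.pyRange (row.getLast?.getD 1) (n + 1) 1).map (fun v => row ++ [v])))
      [[]]
  rows.map (fun row => row.reverse)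

-- ===== PRECONDITION & SPEC =====
-- Pre_ excludes negative m (outside the function's domain of cutoff-vector lengths), where A
-- raises IndexError for n ≥ 1 and accidentally returns [] for n < 1; and m ≥ 997 with n ≥ 1,
-- where A's recursion exceeds CPython's default recursion limit and raises RecursionError.
def Pre_enumerate_k_configurations (m : Int) (n : Int) : Prop := 0 ≤ m ∧ (n < 1 ∨ m < 997)
instance (m : Int) (n : Int) : Decidable (Pre_enumerate_k_configurations m n) := by unfold Pre_enumerate_k_configurations; infer_instance
def pvWitness_enumerate_k_configurations : Int × Int := (3, 3)

def Spec_enumerate_k_configurations (m : Int) (n : Int) (out : List (List Int)) : Prop := out = enumerate_k_configurations_alt m n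
instance (m : Int) (n : Int) (out : List (List Int)) : Decidable (Spec_enumerate_k_configurations m n out) := by unfold Spec_enumerate_k_configurations; infer_instance

-- ===== CLAIM (what is proved, stated in full; the proofs are below) =====
def Claim_equal_enumerate_k_configurations : Prop := ∀ (m : Int) (n : Int), Dom_enumerate_k_configurations m n → Pre_enumerate_k_configurations m n → Spec_enumerate_k_configurations m n (enumerate_k_configurations m n)

-- ===== LEMMAS AND PROOFS =====

/-- Canonical spec: all nondecreasing vectors of length `fuel` with entries in
`[last, n]`, in lexicographic order. -/
def pvGen (n : Int) : Nat → Int → List (List Int)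
  | 0, _ => [[]]
  | f + 1, last =>
    (PySem.List.pyRange last (n + 1) 1).flatMap (fun v => (pvGen n f v).map (v :: ·))

theorem pvFlatMapSingleton (l : List Int) : l.flatMap (fun v => [[v]]) = l.map (fun v => ([v] : List Int)) := by
  induction l with
  | nil => rfl
  | cons x xs ih => simp [List.flatMap_cons, ih]

theorem pvGetLastD_cons (v last : Int) (row : List Int) :
    ((v :: row).getLast?.getD last) = (row.getLast?.getD v) := by
  cases row with
  | nil => simp
  | cons x xs =>
    obtain ⟨y, hy⟩ := Option.isSome_iff_exists.mp (by simp : (x :: xs).getLast?.isSome)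
    simp [List.getLast?_cons_cons, hy]

/-- Generating one position deeper = extending every row of `pvGen` at its tail. -/
theorem pvGen_snoc (n : Int) : ∀ (f : Nat) (last : Int),
    pvGen n (f + 1) last =
      (pvGen n f last).flatMap (fun row =>
        (PySem.List.pyRange (row.getLast?.getD last) (n + 1) 1).map (fun v => row ++ [v])) := by
  intro f
  induction f with
  | zero =>
    intro last
    show (PySem.List.pyRange last (n + 1) 1).flatMap (fun v => [[v]]) = _
    rw [show (pvGen n 0 last) = [[]] from rfl, pvFlatMapSingleton]
    simp
  | succ f ih =>
    intro last
    have h1 : pvGen n (f + 1 + 1) last =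
        (PySem.List.pyRange last (n + 1) 1).flatMap (fun v =>
          (pvGen n f v).flatMap (fun row =>
            (PySem.List.pyRange (row.getLast?.getD v) (n + 1) 1).map
              (fun w => v :: (row ++ [w])))) := by
      show (PySem.List.pyRange last (n + 1) 1).flatMap
          (fun v => (pvGen n (f + 1) v).map (v :: ·)) = _
      refine List.flatMap_congr fun v _ => ?_
      rw [ih v, List.map_flatMap]
      refine List.flatMap_congr fun row _ => ?_
      rw [List.map_map]
      rfl
    have h2 : (pvGen n (f + 1) last).flatMap (fun row =>
          (PySem.List.pyRange (row.getLast?.getD last) (n + 1) 1).map (fun v => row ++ [v])) =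
        (PySem.List.pyRange last (n + 1) 1).flatMap (fun v =>
          (pvGen n f v).flatMap (fun row =>
            (PySem.List.pyRange (row.getLast?.getD v) (n + 1) 1).map
              (fun w => v :: (row ++ [w])))) := by
      rw [show pvGen n (f + 1) last =
          (PySem.List.pyRange last (n + 1) 1).flatMap (fun v => (pvGen n f v).map (v :: ·))
          from rfl]
      rw [List.flatMap_assoc]
      refine List.flatMap_congr fun v _ => ?_
      rw [List.flatMap_map]
      refine List.flatMap_congr fun row _ => ?_
      rw [pvGetLastD_cons]
      simp
    rw [h1, h2]

/-- Invariant of A's backtracking: it appends exactly the `pvGen` family, prefixed by the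
frozen first `pos` cells of `cur` (reversed), and never touches those cells. -/
theorem pvBacktrack_spec (n : Int) : ∀ (fuel : Nat) (m : Int) (pos : Nat) (last : Int)
    (cur : List Int) (configs : List (List Int)),
    (pos : Int) + fuel = m → cur.length = pos + fuel →
    (pvBacktrack m n fuel pos last cur configs).2 =
      configs ++ (pvGen n fuel last).map (fun s => (cur.take pos ++ s).reverse) ∧
    (pvBacktrack m n fuel pos last cur configs).1.take pos = cur.take pos ∧
    (pvBacktrack m n fuel pos last cur configs).1.length = cur.length := by
  intro fuel
  induction fuel with
  | zero =>
    intro m pos last cur configs hm hlen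
    have hpm : (pos : Int) = m := by omega
    have htake : cur.take pos = cur := List.take_of_length_le (by omega)
    have hred : pvBacktrack m n 0 pos last cur configs = (cur, configs ++ [cur.reverse]) := by
      rw [pvBacktrack, if_pos hpm]
    rw [hred]
    simp [pvGen, htake]
  | succ f ih =>
    intro m pos last cur configs hm hlen
    have hne : ¬ ((pos : Int) = m) := by omega
    have key : ∀ (L : List Int) (st : List Int × List (List Int)),
        st.1.take pos = cur.take pos → st.1.length = cur.length →
        (L.foldl (fun st v => pvBacktrack m n f (pos + 1) v (st.1.set pos v) st.2) st).2 =
          st.2 ++ L.flatMap (fun v =>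
            (pvGen n f v).map (fun s => (cur.take pos ++ v :: s).reverse)) ∧
        (L.foldl (fun st v => pvBacktrack m n f (pos + 1) v (st.1.set pos v) st.2) st).1.take pos
          = cur.take pos ∧
        (L.foldl (fun st v => pvBacktrack m n f (pos + 1) v (st.1.set pos v) st.2) st).1.length
          = cur.length := by
      intro L
      induction L with
      | nil => intro st h1 h2; simpa using ⟨h1, h2⟩
      | cons v L ihL =>
        intro st h1 h2
        have hlt : pos < st.1.length := by omega
        have hset : (st.1.set pos v).take (pos + 1) = cur.take pos ++ [v] := by
          rw [List.take_add_one]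
          have : (st.1.set pos v)[pos]? = some v := by
            rw [List.getElem?_set_self (by simpa using hlt)]
          rw [this]
          have : (st.1.set pos v).take pos = cur.take pos := by
            rw [List.take_set_of_le (le_refl pos)]; exact h1
          rw [this]; rfl
        have hsetlen : (st.1.set pos v).length = pos + 1 + f := by simp; omega
        obtain ⟨ha, hb, hc⟩ := ih m (pos + 1) v (st.1.set pos v) st.2 (by push_cast; omega) hsetlen
        set st' := pvBacktrack m n f (pos + 1) v (st.1.set pos v) st.2 with hst'
        have hln : (cur.take pos).length = pos := by simp; omega
        have hb' : st'.1.take pos = cur.take pos := by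
          have : st'.1.take pos = (st'.1.take (pos + 1)).take pos := by
            rw [List.take_take]; congr 1; omega
          rw [this, hb, hset]
          rw [List.take_append_of_le_length (by omega), List.take_take]
          congr 1; omega
        have hc' : st'.1.length = cur.length := by
          rw [hc, List.length_set]; exact h2
        have ha' : st'.2 = st.2 ++ (pvGen n f v).map
            (fun s => (cur.take pos ++ v :: s).reverse) := by
          rw [ha, hset]
          congr 1
          refine List.map_congr_left fun s _ => ?_
          rw [List.append_assoc]; rfl
        obtain ⟨hr1, hr2, hr3⟩ := ihL st' hb' hc'
        refine ⟨?_, ?_, ?_⟩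
        · show (List.foldl _ st' L).2 = _
          rw [hr1, ha', List.append_assoc]
          rfl
        · exact hr2
        · exact hr3
    have hstep : pvBacktrack m n (f + 1) pos last cur configs =
        (PySem.List.pyRange last (n + 1) 1).foldl
          (fun st v => pvBacktrack m n f (pos + 1) v (st.1.set pos v) st.2)
          (cur, configs) := by
      rw [pvBacktrack]; simp [hne]
    obtain ⟨h1, h2, h3⟩ := key (PySem.List.pyRange last (n + 1) 1) (cur, configs) rfl rfl
    rw [hstep]
    refine ⟨?_, h2, h3⟩
    rw [h1]
    congr 1
    rw [show pvGen n (f + 1) last =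
        (PySem.List.pyRange last (n + 1) 1).flatMap (fun v => (pvGen n f v).map (v :: ·))
        from rfl]
    rw [List.map_flatMap]
    refine List.flatMap_congr fun v _ => ?_
    rw [List.map_map]
    rfl

/-- B's fold builds exactly `pvGen` level by level. -/
theorem pvFold_gen (n : Int) : ∀ (L : List Int) (k : Nat),
    L.foldl (fun rows _ =>
        rows.flatMap (fun row =>
          (PySem.List.pyRange (row.getLast?.getD 1) (n + 1) 1).map (fun v => row ++ [v])))
      (pvGen n k 1) = pvGen n (k + L.length) 1 := by
  intro L
  induction L with
  | nil => intro k; simp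
  | cons x L ihL =>
    intro k
    show List.foldl _ ((pvGen n k 1).flatMap _) L = _
    rw [← pvGen_snoc n k 1, ihL (k + 1)]
    congr 1
    simp; omega

-- ===== VERDICT (by name: the statement is the Claim_ definition above) =====
theorem enumerate_k_configurations_spec : Claim_equal_enumerate_k_configurations := by
  intro m n _ hpre
  obtain ⟨hpre, -⟩ := hpre
  show enumerate_k_configurations m n = enumerate_k_configurations_alt m n
  have hm : ((0 : Nat) : Int) + (m.toNat : Int) = m := by
    have := Int.toNat_of_nonneg hpre; omega
  obtain ⟨hA, -, -⟩ := pvBacktrack_spec n m.toNat m 0 1 (List.replicate m.toNat 1) [] hm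
    (by simp)
  have hB : enumerate_k_configurations_alt m n =
      (pvGen n m.toNat 1).map (fun row => row.reverse) := by
    show ((PySem.List.pyRange 0 m 1).foldl _ [[]]).map _ = _
    have h0 : ([[]] : List (List Int)) = pvGen n 0 1 := rfl
    rw [h0, pvFold_gen n (PySem.List.pyRange 0 m 1) 0]
    congr 2
    rw [PySem.List.length_pyRange_one]
    simp
  rw [enumerate_k_configurations, hA, hB]
  simp
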